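-- pv_equiv track=rewrite | github.com/notr0hit/Scripts | rename_subs.py | find_info
-- ===== SOURCE A (Python) =====
-- def valid(file_name, indices):
-- 	res = True
-- 	for index in indices:
-- 		res = res and file_name[index].isdigit()
--
-- 	return res
--
-- def find_info(file_name):
-- 	file_name = file_name.lower().replace(" ", "").replace(".", "").replace("_", "").lower()
-- 	season = 0
-- 	episode = 0
-- 	for i in range(len(file_name)):
-- 		# s01e01
-- 		if(file_name[i] == 's'):
-- 			if(i+3 < len(file_name) and file_name[i+3] == 'e'):
-- 				if (i+5 < len(file_name) and valid(file_name, [i+1, i+2, i+4, i+5])):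
-- 					season = int(file_name[i+1:i+3])
-- 					episode = int(file_name[i+4:i+6])
-- 					break
--
-- 		# 01x01
-- 		if (file_name[i] == 'x'):
-- 			if ((i+2)<len(file_name) and (i-2)>=0 and valid(file_name, [i+1,i+2, i-1, i-2])):
-- 				season = int(file_name[i-2:i])
-- 				episode = int(file_name[i+1:i+3])
-- 				break
--
-- 	return [season, episode]
-- ===== SOURCE B (Python) =====
-- def find_info(file_name):
--     name = file_name.lower().replace(" ", "").replace(".", "").replace("_", "")
--     s = next((i for i in range(len(name) - 5)
--               if name[i] == 's' and name[i+3] == 'e'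
--               and name[i+1:i+3].isdigit() and name[i+4:i+6].isdigit()), None)
--     x = next((j for j in range(2, len(name) - 2)
--               if name[j] == 'x'
--               and name[j-2:j].isdigit() and name[j+1:j+3].isdigit()), None)
--     if s is not None and (x is None or s < x):
--         return [int(name[s+1:s+3]), int(name[s+4:s+6])]
--     if x is not None:
--         return [int(name[x-2:x]), int(name[x+1:x+3])]
--     return [0, 0]
-- ===== Notes on version B (the rewrite author's own statement) =====
-- stated objective: simpler
-- what changed: Instead of one indexed scan that interleaves both pattern checks via a valid() index-list helper and break, B searches for each pattern's first anchor separately with slice-based generator expressions and then picks the pattern with the smaller anchor (s at its start, x at the x character).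
import Mathlib
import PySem

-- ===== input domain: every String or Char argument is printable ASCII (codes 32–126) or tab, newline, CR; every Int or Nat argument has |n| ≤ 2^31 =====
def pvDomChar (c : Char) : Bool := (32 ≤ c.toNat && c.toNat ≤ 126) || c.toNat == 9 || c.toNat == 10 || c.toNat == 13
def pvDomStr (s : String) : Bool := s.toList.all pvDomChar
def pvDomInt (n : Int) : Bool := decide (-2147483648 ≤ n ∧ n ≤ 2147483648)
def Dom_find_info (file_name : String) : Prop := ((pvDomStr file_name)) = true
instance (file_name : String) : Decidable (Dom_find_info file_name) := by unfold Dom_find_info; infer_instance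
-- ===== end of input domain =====

-- B replaces A's single interleaved indexed scan (with the valid() index-list helper and break)
-- by two independent first-anchor searches, one per pattern, combined by smaller anchor (objective: simpler).

-- ===== PORT A =====
-- valid(file_name, indices): fold over the index list; out-of-range (Python IndexError) is
-- modelled as false — unreachable here since every call site guards all four indices.
def pvValid (cs : List Char) (indices : List Int) : Bool :=
  indices.foldl (fun res idx =>
    res && ((PySem.List.pyGet? cs idx).elim false PySem.Chars.isdigit)) true

-- int(file_name[a:b]); none (Python ValueError) is unreachable: valid() guarantees digits.
def pvInt2 (cs : List Char) (a b : Int) : Int :=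
  (PySem.Int.ofStr? (String.ofList (PySem.List.slice cs (some a) (some b)))).getD 0

-- the for-loop over range(len(file_name)) with break
def pvLoopA (cs : List Char) (i : Nat) : List Int :=
  if i < cs.length then
    if cs.getD i ' ' == 's' && decide (i+3 < cs.length) && cs.getD (i+3) ' ' == 'e'
        && decide (i+5 < cs.length)
        && pvValid cs [(i:Int)+1, (i:Int)+2, (i:Int)+4, (i:Int)+5] then
      [pvInt2 cs ((i:Int)+1) ((i:Int)+3), pvInt2 cs ((i:Int)+4) ((i:Int)+6)]
    else if cs.getD i ' ' == 'x' && decide ((i:Int)+2 < (cs.length:Int)) && decide (0 ≤ (i:Int)-2)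
        && pvValid cs [(i:Int)+1, (i:Int)+2, (i:Int)-1, (i:Int)-2] then
      [pvInt2 cs ((i:Int)-2) (i:Int), pvInt2 cs ((i:Int)+1) ((i:Int)+3)]
    else pvLoopA cs (i+1)
  else [0, 0]
termination_by cs.length - i

def pvPreprocess (s : String) : List Char :=
  PySem.Chars.lower (PySem.Chars.replace (PySem.Chars.replace (PySem.Chars.replace
    (PySem.Chars.lower s.toList) [' '] []) ['.'] []) ['_'] [])

def find_info (file_name : String) : List Int :=
  pvLoopA (pvPreprocess file_name) 0

-- ===== PORT B =====
-- int(name[a:a+2]) for an in-range nonnegative two-character slice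
def pvNum (cs : List Char) (a : Nat) : Int :=
  (PySem.Int.ofStr? (String.ofList ((cs.drop a).take 2))).getD 0

-- name[i] == 's' and name[i+3] == 'e' and name[i+1:i+3].isdigit() and name[i+4:i+6].isdigit()
def pvPredS (cs : List Char) (i : Nat) : Bool :=
  cs.getD i ' ' == 's' && cs.getD (i+3) ' ' == 'e'
    && PySem.Chars.strIsdigit ((cs.drop (i+1)).take 2)
    && PySem.Chars.strIsdigit ((cs.drop (i+4)).take 2)

-- name[j] == 'x' and name[j-2:j].isdigit() and name[j+1:j+3].isdigit()
def pvPredX (cs : List Char) (j : Nat) : Bool :=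
  cs.getD j ' ' == 'x'
    && PySem.Chars.strIsdigit ((cs.drop (j-2)).take 2)
    && PySem.Chars.strIsdigit ((cs.drop (j+1)).take 2)

-- first i in range(len(name)-5) matching the s-pattern  (next(generator, None))
def pvFirstS (cs : List Char) (i : Nat) : Option Nat :=
  if i + 5 < cs.length then
    if pvPredS cs i then some i else pvFirstS cs (i+1)
  else none
termination_by cs.length - i

-- first j in range(2, len(name)-2) matching the x-pattern, anchored at the x  (next(generator, None))
def pvFirstX (cs : List Char) (j : Nat) : Option Nat :=
  if j + 2 < cs.length then
    if pvPredX cs j then some j else pvFirstX cs (j+1)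
  else none
termination_by cs.length - j

-- the final if-chain of B: whichever anchor is smaller wins
def pvCombine (cs : List Char) : Option Nat → Option Nat → List Int
  | some si, some xi => if si < xi then [pvNum cs (si+1), pvNum cs (si+4)]
                        else [pvNum cs (xi-2), pvNum cs (xi+1)]
  | some si, none    => [pvNum cs (si+1), pvNum cs (si+4)]
  | none,    some xi => [pvNum cs (xi-2), pvNum cs (xi+1)]
  | none,    none    => [0, 0]

-- B's preprocessing: name = file_name.lower().replace(" ", "").replace(".", "").replace("_", "")
-- (B drops A's redundant second .lower(); the lemma pvPreprocess_eq below proves both equal)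
def pvPreprocessB (s : String) : List Char :=
  PySem.Chars.replace (PySem.Chars.replace (PySem.Chars.replace
    (PySem.Chars.lower s.toList) [' '] []) ['.'] []) ['_'] []

def find_info_alt (file_name : String) : List Int :=
  let cs := pvPreprocessB file_name
  pvCombine cs (pvFirstS cs 0) (pvFirstX cs 2)

-- ===== PRECONDITION & SPEC =====
def Spec_find_info (file_name : String) (out : List Int) : Prop := out = find_info_alt file_name
instance (file_name : String) (out : List Int) : Decidable (Spec_find_info file_name out) := by unfold Spec_find_info; infer_instance

-- ===== CLAIM (what is proved, stated in full; the proofs are below) =====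
def Claim_equal_find_info : Prop := ∀ (file_name : String), Dom_find_info file_name → Spec_find_info file_name (find_info file_name)

-- ===== LEMMAS AND PROOFS =====

theorem pvLowerChar_idem (c : Char) :
    PySem.Chars.lowerChar (PySem.Chars.lowerChar c) = PySem.Chars.lowerChar c := by
  by_cases hu : ('A' ≤ c ∧ c ≤ 'Z')
  · have hz : c.toNat ≤ 90 := Fin.mk_le_mk.mp hu.2
    have ha : 65 ≤ c.toNat := Fin.mk_le_mk.mp hu.1
    have h1 : PySem.Chars.lowerChar c = Char.ofNat (c.toNat + 32) := by
      unfold PySem.Chars.lowerChar PySem.Chars.isupper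
      rw [if_pos (by simp [hu.1, hu.2])]
    have ht : (Char.ofNat (c.toNat + 32)).toNat = c.toNat + 32 := by
      rw [Char.toNat_ofNat, if_pos]
      left; omega
    rw [h1]
    unfold PySem.Chars.lowerChar PySem.Chars.isupper
    rw [if_neg]
    intro hcon
    rw [Bool.and_eq_true, decide_eq_true_eq, decide_eq_true_eq] at hcon
    have h2 : (Char.ofNat (c.toNat + 32)).toNat ≤ 90 := Fin.mk_le_mk.mp hcon.2
    rw [ht] at h2
    omega
  · have h1 : PySem.Chars.lowerChar c = c := by
      unfold PySem.Chars.lowerChar PySem.Chars.isupper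
      rw [if_neg (by simpa using fun h1 h2 => hu ⟨h1, h2⟩)]
    rw [h1, h1]

theorem pvMem_replace_go (old new : List Char) (fuel : Nat) (l acc : List Char) (c : Char)
    (h : c ∈ PySem.Chars.replace.go old new fuel l acc) : c ∈ new ∨ c ∈ l ∨ c ∈ acc := by
  induction fuel generalizing l acc with
  | zero =>
    rw [PySem.Chars.replace.go] at h
    simp at h
    tauto
  | succ n ih =>
    cases l with
    | nil =>
      rw [PySem.Chars.replace.go] at h
      simp at h
      all_goals tauto
    | cons a t =>
      rw [PySem.Chars.replace.go] at h
      by_cases hp : old.isPrefixOf (a :: t)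
      · simp only [hp, if_true] at h
        rcases ih _ _ h with h1 | h2 | h3
        · tauto
        · right; left; exact List.mem_of_mem_drop h2
        · simp at h3
          tauto
      · simp only [hp] at h
        rcases ih _ _ h with h1 | h2 | h3
        · tauto
        · right; left; exact List.mem_cons_of_mem _ h2
        · simp at h3
          rcases h3 with h3 | h3
          · subst h3; right; left; exact List.mem_cons_self
          · tauto

theorem pvMem_replace_nil (xs old : List Char) (hold : ¬ old.isEmpty = true) (c : Char)
    (h : c ∈ PySem.Chars.replace xs old []) : c ∈ xs := by
  rw [PySem.Chars.replace, if_neg hold] at h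
  rcases pvMem_replace_go old [] xs.length xs [] c h with h1 | h2 | h3
  · cases h1
  · exact h2
  · cases h3

theorem pvLower_fixed (ys : List Char) (h : ∀ c ∈ ys, PySem.Chars.lowerChar c = c) :
    PySem.Chars.lower ys = ys := by
  unfold PySem.Chars.lower
  exact (List.map_congr_left h).trans (List.map_id ys)

theorem pvPreprocess_eq (s : String) : pvPreprocess s = pvPreprocessB s := by
  unfold pvPreprocess pvPreprocessB
  apply pvLower_fixed
  intro c hc
  have h1 := pvMem_replace_nil _ ['_'] (by simp) c hc
  have h2 := pvMem_replace_nil _ ['.'] (by simp) c h1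
  have h3 := pvMem_replace_nil _ [' '] (by simp) c h2
  obtain ⟨d, _, rfl⟩ := List.mem_map.mp h3
  exact pvLowerChar_idem d


theorem pvTake2 (cs : List Char) (a : Nat) (h : a + 1 < cs.length) :
    (cs.drop a).take 2 = [cs[a], cs[a+1]] := by
  rw [List.drop_eq_getElem_cons (by omega), List.drop_eq_getElem_cons (h := h)]
  rfl

theorem pvDigit2 (cs : List Char) (a : Nat) (h : a + 1 < cs.length) :
    PySem.Chars.strIsdigit ((cs.drop a).take 2)
      = (PySem.Chars.isdigit cs[a] && PySem.Chars.isdigit cs[a+1]) := by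
  rw [pvTake2 cs a h]
  simp [PySem.Chars.strIsdigit]

theorem pvCondS_eq (cs : List Char) (i : Nat) :
    (cs.getD i ' ' == 's' && decide (i+3 < cs.length) && cs.getD (i+3) ' ' == 'e'
        && decide (i+5 < cs.length)
        && pvValid cs [(i:Int)+1, (i:Int)+2, (i:Int)+4, (i:Int)+5])
      = (decide (i + 5 < cs.length) && pvPredS cs i) := by
  by_cases h5 : i + 5 < cs.length
  · have e1 : (i:Int)+1 = ((i+1 : Nat) : Int) := by push_cast; ring
    have e2 : (i:Int)+2 = ((i+2 : Nat) : Int) := by push_cast; ring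
    have e4 : (i:Int)+4 = ((i+4 : Nat) : Int) := by push_cast; ring
    have e5 : (i:Int)+5 = ((i+5 : Nat) : Int) := by push_cast; ring
    simp only [pvValid, List.foldl, e1, e2, e4, e5, PySem.List.pyGet?_natCast]
    simp only [List.getElem?_eq_getElem (by omega : i+1 < cs.length),
      List.getElem?_eq_getElem (by omega : i+2 < cs.length),
      List.getElem?_eq_getElem (by omega : i+4 < cs.length),
      List.getElem?_eq_getElem (by omega : i+5 < cs.length), Option.elim]
    simp only [pvPredS, pvDigit2 cs (i+1) (by omega), pvDigit2 cs (i+4) (by omega)]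
    have h3 : i + 3 < cs.length := by omega
    simp only [h3, h5, decide_true, show i+1+1 = i+2 by omega, show i+4+1 = i+5 by omega]
    cases cs.getD i ' ' == 's' <;> cases cs.getD (i+3) ' ' == 'e' <;>
      cases PySem.Chars.isdigit cs[i+1] <;> cases PySem.Chars.isdigit cs[i+2] <;>
      cases PySem.Chars.isdigit cs[i+4] <;> cases PySem.Chars.isdigit cs[i+5] <;> rfl
  · rw [decide_eq_false h5]
    simp

theorem pvCondX_eq (cs : List Char) (i : Nat) :
    (cs.getD i ' ' == 'x' && decide ((i:Int)+2 < (cs.length:Int)) && decide (0 ≤ (i:Int)-2)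
        && pvValid cs [(i:Int)+1, (i:Int)+2, (i:Int)-1, (i:Int)-2])
      = (decide (2 ≤ i) && decide (i + 2 < cs.length) && pvPredX cs i) := by
  by_cases hc2 : 2 ≤ i
  · by_cases hlen : i + 2 < cs.length
    · rw [decide_eq_true (show (i:Int)+2 < (cs.length:Int) by omega),
        decide_eq_true (show (0:Int) ≤ (i:Int)-2 by omega)]
      have e1 : (i:Int)+1 = ((i+1 : Nat) : Int) := by omega
      have e2 : (i:Int)+2 = ((i+2 : Nat) : Int) := by omega
      have em1 : (i:Int)-1 = ((i-1 : Nat) : Int) := by omega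
      have em2 : (i:Int)-2 = ((i-2 : Nat) : Int) := by omega
      simp only [pvValid, List.foldl, e1, e2, em1, em2, PySem.List.pyGet?_natCast]
      simp only [List.getElem?_eq_getElem (by omega : i+1 < cs.length),
        List.getElem?_eq_getElem (by omega : i+2 < cs.length),
        List.getElem?_eq_getElem (by omega : i-1 < cs.length),
        List.getElem?_eq_getElem (by omega : i-2 < cs.length), Option.elim]
      simp only [pvPredX, pvDigit2 cs (i-2) (by omega), pvDigit2 cs (i+1) (by omega)]
      simp only [hc2, hlen, decide_true, show i-2+1 = i-1 by omega,
        show i+1+1 = i+2 by omega]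
      cases cs.getD i ' ' == 'x' <;>
        cases PySem.Chars.isdigit cs[i+1] <;> cases PySem.Chars.isdigit cs[i+2] <;>
        cases PySem.Chars.isdigit cs[i-1] <;> cases PySem.Chars.isdigit cs[i-2] <;> rfl
    · have : ¬ ((i:Int)+2 < (cs.length:Int)) := by omega
      rw [decide_eq_false this, decide_eq_false hlen]
      simp
  · have : ¬ (0 ≤ (i:Int)-2) := by omega
    rw [decide_eq_false this, decide_eq_false hc2]
    simp

theorem pvFirstS_some (cs : List Char) (i k : Nat) (h : pvFirstS cs i = some k) :
    i ≤ k ∧ k + 5 < cs.length ∧ pvPredS cs k = true := by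
  fun_induction pvFirstS cs i with
  | case1 i hg hp => cases h; exact ⟨le_refl _, hg, hp⟩
  | case2 i hg hp ih => have := ih h; exact ⟨by omega, this.2⟩
  | case3 i hg => cases h

theorem pvFirstX_some (cs : List Char) (j k : Nat) (h : pvFirstX cs j = some k) :
    j ≤ k ∧ k + 2 < cs.length ∧ pvPredX cs k = true := by
  fun_induction pvFirstX cs j with
  | case1 j hg hp => cases h; exact ⟨le_refl _, hg, hp⟩
  | case2 j hg hp ih => have := ih h; exact ⟨by omega, this.2⟩
  | case3 j hg => cases h

theorem pvInt2_nat (cs : List Char) (a b : Int) (ha : 0 ≤ a) (hb : b = a + 2) :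
    pvInt2 cs a b = pvNum cs a.toNat := by
  unfold pvInt2 pvNum
  rw [PySem.List.slice_toNat cs ha (by omega), show b.toNat - a.toNat = 2 by omega]

theorem loopA_eq (cs : List Char) (i : Nat) :
    pvLoopA cs i = pvCombine cs (pvFirstS cs i) (pvFirstX cs (max 2 i)) := by
  have key : ∀ n j, cs.length - j ≤ n →
      pvLoopA cs j = pvCombine cs (pvFirstS cs j) (pvFirstX cs (max 2 j)) := by
    intro n
    induction n with
    | zero =>
      intro j h
      rw [pvLoopA.eq_def, if_neg (by omega : ¬ j < cs.length),
        pvFirstS.eq_def, if_neg (by omega : ¬ j + 5 < cs.length),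
        pvFirstX.eq_def, if_neg (by omega : ¬ max 2 j + 2 < cs.length)]
      rfl
    | succ n ih =>
      intro j h
      by_cases hj : j < cs.length
      · rw [pvLoopA.eq_def, if_pos hj, pvCondS_eq, pvCondX_eq]
        by_cases hS : (decide (j + 5 < cs.length) && pvPredS cs j) = true
        · rw [if_pos hS]
          simp only [Bool.and_eq_true, decide_eq_true_eq] at hS
          obtain ⟨hg5, hp⟩ := hS
          have hfs : pvFirstS cs j = some j := by
            rw [pvFirstS.eq_def, if_pos hg5, if_pos hp]
          rw [hfs,
            pvInt2_nat cs ((j:Int)+1) ((j:Int)+3) (by omega) (by ring),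
            pvInt2_nat cs ((j:Int)+4) ((j:Int)+6) (by omega) (by ring),
            show ((j:Int)+1).toNat = j+1 by omega, show ((j:Int)+4).toNat = j+4 by omega]
          cases hfx : pvFirstX cs (max 2 j) with
          | none => rfl
          | some xi =>
            obtain ⟨hxge, _, hpx⟩ := pvFirstX_some cs _ _ hfx
            have hxs : cs.getD xi ' ' = 'x' := by
              simp only [pvPredX, Bool.and_eq_true, beq_iff_eq] at hpx
              exact hpx.1.1
            have hss : cs.getD j ' ' = 's' := by
              simp only [pvPredS, Bool.and_eq_true, beq_iff_eq] at hp
              exact hp.1.1.1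
            have hne : j ≠ xi := fun e => by rw [e, hxs] at hss; cases hss
            have hlt : j < xi := by omega
            show _ = if j < xi then _ else _
            rw [if_pos hlt]
        · rw [if_neg hS]
          by_cases hX : (decide (2 ≤ j) && decide (j + 2 < cs.length) && pvPredX cs j) = true
          · rw [if_pos hX]
            simp only [Bool.and_eq_true, decide_eq_true_eq] at hX
            obtain ⟨⟨h2, hlen⟩, hpx⟩ := hX
            have hfx : pvFirstX cs (max 2 j) = some j := by
              rw [show max 2 j = j by omega, pvFirstX.eq_def, if_pos hlen, if_pos hpx]
            rw [hfx,
              pvInt2_nat cs ((j:Int)-2) (j:Int) (by omega) (by ring),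
              pvInt2_nat cs ((j:Int)+1) ((j:Int)+3) (by omega) (by ring),
              show ((j:Int)-2).toNat = j-2 by omega, show ((j:Int)+1).toNat = j+1 by omega]
            cases hfs : pvFirstS cs j with
            | none => rfl
            | some si =>
              obtain ⟨hsge, hsl, hps⟩ := pvFirstS_some cs _ _ hfs
              have hne : si ≠ j := by
                rintro rfl
                exact hS (by simp [hsl, hps])
              show _ = if si < j then _ else _
              rw [if_neg (by omega)]
          · rw [if_neg hX, ih (j+1) (by omega)]
            have e_s : pvFirstS cs j = pvFirstS cs (j+1) := by
              by_cases hg : j + 5 < cs.length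
              · have hp : pvPredS cs j = false := by
                  cases hp' : pvPredS cs j
                  · rfl
                  · exact absurd (by simp [hg, hp']) hS
                rw [pvFirstS.eq_def, if_pos hg, hp]
                rfl
              · rw [pvFirstS.eq_def, if_neg hg, pvFirstS.eq_def,
                  if_neg (by omega : ¬ j + 1 + 5 < cs.length)]
            have e_x : pvFirstX cs (max 2 j) = pvFirstX cs (max 2 (j+1)) := by
              by_cases h2 : 2 ≤ j
              · rw [show max 2 j = j by omega, show max 2 (j+1) = j+1 by omega]
                by_cases hg : j + 2 < cs.length
                · have hp : pvPredX cs j = false := by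
                    cases hp' : pvPredX cs j
                    · rfl
                    · exact absurd (by simp [h2, hg, hp']) hX
                  rw [pvFirstX.eq_def, if_pos hg, hp]
                  rfl
                · rw [pvFirstX.eq_def, if_neg hg, pvFirstX.eq_def,
                    if_neg (by omega : ¬ j + 1 + 2 < cs.length)]
              · rw [show max 2 j = 2 by omega, show max 2 (j+1) = 2 by omega]
            rw [e_s, e_x]
      · rw [pvLoopA.eq_def, if_neg hj,
          pvFirstS.eq_def, if_neg (by omega : ¬ j + 5 < cs.length),
          pvFirstX.eq_def, if_neg (by omega : ¬ max 2 j + 2 < cs.length)]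
        rfl
  exact key cs.length i (by omega)

-- ===== VERDICT (by name: the statement is the Claim_ definition above) =====
theorem find_info_spec : Claim_equal_find_info := by
  intro s _
  show find_info s = find_info_alt s
  unfold find_info find_info_alt
  rw [pvPreprocess_eq]
  exact loopA_eq (pvPreprocessB s) 0
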